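-- pv_equiv track=rewrite | github.com/nikobent/AOC2021 | D3T2.py | c02
-- ===== SOURCE A (Python) =====
-- def c02(sequences):
--     for i, num in enumerate(sequences[0]):
--         helper = 0
--         for j, seq in enumerate(sequences):
--             if seq[i] == '1':
--                 helper = helper + 1
--             else:
--                 helper = helper - 1
--         helper = (0 if helper >= 0 else 1)
--         sequences = list(filter(lambda x: int(x[i]) == helper, sequences))
--         if len(sequences) == 1:
--             break
--     return sequences[0]
-- ===== SOURCE B (Python) =====
-- def c02(sequences):
--     L = len(sequences[0])
--     for i in range(L):
--         ones, zeros = [], []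
--         for seq in sequences:
--             (ones if int(seq[i]) == 1 else zeros).append(seq)
--         sequences = zeros if len(ones) >= len(zeros) else ones
--         if len(sequences) == 1:
--             break
--     return sequences[0]
-- ===== Notes on version B (the rewrite author's own statement) =====
-- stated objective: alternative
-- what changed: Each bit position is handled by one partition of the survivors into ones/zeros lists with the kept side selected by comparing their lengths, instead of A's signed-count pass followed by a separate int(x[i])==keep refilter pass over the same list.
-- outside the precondition, e.g. on c02(['0x', '10']): A returns '0x', B returns '0x'; on c02(['1', '1a', '2', '0']): A returns '0', B returns '2'
import Mathlib
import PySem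

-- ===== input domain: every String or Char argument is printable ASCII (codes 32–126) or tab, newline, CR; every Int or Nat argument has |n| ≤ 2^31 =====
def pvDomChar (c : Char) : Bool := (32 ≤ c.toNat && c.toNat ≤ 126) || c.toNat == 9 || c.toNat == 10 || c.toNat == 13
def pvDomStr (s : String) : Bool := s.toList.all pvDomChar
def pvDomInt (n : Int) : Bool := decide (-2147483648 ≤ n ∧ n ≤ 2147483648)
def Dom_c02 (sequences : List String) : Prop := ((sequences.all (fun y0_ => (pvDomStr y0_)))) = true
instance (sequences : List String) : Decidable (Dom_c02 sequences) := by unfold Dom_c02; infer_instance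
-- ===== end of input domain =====

-- B replaces A's count-then-refilter pass by a single partition into ones/zeros per bit
-- (alternative decomposition; same return value, no speed claim).

-- ===== PORT A =====
-- one step per bit position i: signed count, then filter by int(x[i]) == keep; break at length 1
def c02Go (seqs : List String) : List Nat → List String
  | [] => seqs
  | i :: rest =>
    let cnt := seqs.foldl (fun h s => if s.toList.getD i ' ' = '1' then h + 1 else h - 1) (0 : Int)
    let keep : Int := if 0 ≤ cnt then 0 else 1
    -- int(x[i]) on a digit char is its value; ported as toNat - 48 (exact for digits; Pre_ admits only '0'/'1')
    let seqs' := seqs.filter (fun x => ((x.toList.getD i ' ').toNat : Int) - 48 == keep)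
    if seqs'.length = 1 then seqs' else c02Go seqs' rest

def c02 (sequences : List String) : String :=
  (c02Go sequences (List.range (sequences.headD "").toList.length)).headD ""

-- ===== PORT B =====
-- one step per bit position i: partition by int(seq[i]) == 1 into ones/zeros, pick zeros iff
-- |ones| ≥ |zeros|; break at length 1 (int on a digit char ported as toNat - 48, exact for digits)
def c02AltGo (seqs : List String) : List Nat → List String
  | [] => seqs
  | i :: rest =>
    let oz := seqs.foldr
      (fun s (oz : List String × List String) =>
        if ((s.toList.getD i ' ').toNat : Int) - 48 == 1 then (s :: oz.1, oz.2) else (oz.1, s :: oz.2))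
      ([], [])
    let seqs' := if oz.2.length ≤ oz.1.length then oz.2 else oz.1
    if seqs'.length = 1 then seqs' else c02AltGo seqs' rest

def c02_alt (sequences : List String) : String :=
  (c02AltGo sequences (List.range (sequences.headD "").toList.length)).headD ""

-- ===== PRECONDITION & SPEC =====
-- Pre_ restricts to the puzzle's diagnostic format — a nonempty list of equal-length 0/1 strings
-- (or a first string "", on which A returns it at once) — plus the bit-criteria descent reaching a
-- survivor (exactly the no-crash condition on that format); A also happens to return on some ragged
-- or non-binary inputs when the break fires before the offending character is reached — those
-- accidental successes are excluded here.
def Pre_c02 (sequences : List String) : Prop :=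
  -- diagnostic-report shape, e.g. sequences = ["01", "11", "10"] (answer "01") or ["0", "0", "1"] (answer "1")
  sequences ≠ [] ∧
  ((sequences.headD "") = "" ∨
  ((∀ s ∈ sequences, s.toList.length = (sequences.headD "").toList.length ∧
      (s.toList.all (fun c => c = '0' || c = '1')) = true) ∧
  ∃ w ∈ sequences, ∀ i < (sequences.headD "").toList.length,
    (1 ≤ i ∧ (sequences.filter (fun x => x.toList.take i = w.toList.take i)).length = 1) ∨
    (w.toList.getD i ' ' =
      (if (sequences.filter (fun x => x.toList.take i = w.toList.take i)).length ≤
          2 * ((sequences.filter (fun x => x.toList.take i = w.toList.take i)).filter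
                (fun x => x.toList.getD i ' ' = '1')).length
       then '0' else '1'))))

instance (sequences : List String) : Decidable (Pre_c02 sequences) := by
  unfold Pre_c02; infer_instance

def pvWitness_c02 : List String := (["01", "11", "10"])

def Spec_c02 (sequences : List String) (out : String) : Prop := out = c02_alt sequences
instance (sequences : List String) (out : String) : Decidable (Spec_c02 sequences out) := by unfold Spec_c02; infer_instance

-- ===== CLAIM (what is proved, stated in full; the proofs are below) =====
def Claim_equal_c02 : Prop := ∀ (sequences : List String), Dom_c02 sequences → Pre_c02 sequences → Spec_c02 sequences (c02 sequences)

-- ===== LEMMAS AND PROOFS =====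

theorem c02_partition (p : String → Bool) (seqs : List String) :
    seqs.foldr
      (fun s (oz : List String × List String) =>
        if p s then (s :: oz.1, oz.2) else (oz.1, s :: oz.2))
      ([], [])
    = (seqs.filter p, seqs.filter (fun s => !(p s))) := by
  induction seqs with
  | nil => rfl
  | cons a l ih =>
    rw [List.foldr_cons, ih, List.filter_cons, List.filter_cons]
    by_cases h : p a = true
    · rw [if_pos h, if_pos h, if_neg (by simp [h])]
    · rw [if_neg h, if_neg h, if_pos (by simp [h])]

theorem c02_count (i : Nat) (seqs : List String) : ∀ c : Int,
    seqs.foldl (fun h s => if s.toList.getD i ' ' = '1' then h + 1 else h - 1) c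
    = c + (seqs.filter (fun s => s.toList.getD i ' ' = '1')).length
        - (seqs.filter (fun s => ¬ (s.toList.getD i ' ' = '1'))).length := by
  induction seqs with
  | nil => intro c; simp
  | cons a l ih =>
    intro c
    rw [List.foldl_cons, List.filter_cons, List.filter_cons]
    by_cases h : a.toList.getD i ' ' = '1'
    · rw [if_pos h, ih, if_pos (by exact decide_eq_true h), if_neg (by simpa using h)]
      push_cast [List.length_cons]; ring
    · rw [if_neg h, ih, if_neg (by simpa using h), if_pos (by simpa using h)]
      push_cast [List.length_cons]; ring

theorem c02_go_eq (idx : List Nat) : ∀ (seqs : List String) (L : Nat),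
    (∀ s ∈ seqs, s.toList.length = L ∧ (s.toList.all (fun c => c = '0' || c = '1')) = true) →
    (∀ i ∈ idx, i < L) →
    c02Go seqs idx = c02AltGo seqs idx := by
  induction idx with
  | nil => intro seqs L _ _; rfl
  | cons i rest ih =>
    intro seqs L hinv hlt
    have hiL : i < L := hlt i (by simp)
    -- each admitted string has a binary character at position i
    have hbit : ∀ s ∈ seqs, s.toList.getD i ' ' = '0' ∨ s.toList.getD i ' ' = '1' := by
      intro s hs
      obtain ⟨hlen, hbin⟩ := hinv s hs
      have hi : i < s.toList.length := by omega
      rw [List.getD_eq_getElem s.toList ' ' hi]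
      have := (List.all_eq_true.mp hbin) _ (s.toList.getElem_mem hi)
      simpa using this
    set ones := seqs.filter (fun s => s.toList.getD i ' ' = '1') with hones
    set zeros := seqs.filter (fun s => ¬ (s.toList.getD i ' ' = '1')) with hzeros
    have hfilter0 :
        seqs.filter (fun x => ((x.toList.getD i ' ').toNat : Int) - 48 == (0 : Int)) = zeros := by
      rw [hzeros]
      apply List.filter_congr
      intro x hx
      rcases hbit x hx with h | h <;> rw [h] <;> decide
    have hfilter1 :
        seqs.filter (fun x => ((x.toList.getD i ' ').toNat : Int) - 48 == (1 : Int)) = ones := by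
      rw [hones]
      apply List.filter_congr
      intro x hx
      rcases hbit x hx with h | h <;> rw [h] <;> decide
    have hinv' : ∀ (l : List String), (∀ s ∈ l, s ∈ seqs) →
        ∀ s ∈ l, s.toList.length = L ∧ (s.toList.all (fun c => c = '0' || c = '1')) = true := by
      intro l hsub s hs; exact hinv s (hsub s hs)
    have hlt' : ∀ j ∈ rest, j < L := fun j hj => hlt j (by simp [hj])
    rw [c02Go, c02AltGo, c02_partition, c02_count]
    have hq0 : seqs.filter (fun s => !(((s.toList.getD i ' ').toNat : Int) - 48 == 1)) = zeros := by
      rw [hzeros]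
      apply List.filter_congr
      intro x hx
      rcases hbit x hx with h | h <;> rw [h] <;> decide
    rw [hfilter1, hq0]
    by_cases hc : zeros.length ≤ ones.length
    · rw [if_pos (show (0:Int) ≤ 0 + ones.length - zeros.length by omega),
        if_pos hc, hfilter0]
      split
      · rfl
      · exact ih zeros L (hinv' zeros (fun s hs => (List.mem_filter.mp hs).1)) hlt'
    · rw [if_neg (show ¬ ((0:Int) ≤ 0 + ones.length - zeros.length) by omega),
        if_neg hc, hfilter1]
      split
      · rfl
      · exact ih ones L (hinv' ones (fun s hs => (List.mem_filter.mp hs).1)) hlt'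

-- ===== VERDICT (by name: the statement is the Claim_ definition above) =====
theorem c02_spec : Claim_equal_c02 := by
  intro sequences _ hpre
  unfold Spec_c02 c02 c02_alt
  rcases hpre with ⟨_, hempty | ⟨hinv, _⟩⟩
  · rw [hempty]; rfl
  · rw [c02_go_eq _ sequences (sequences.headD "").toList.length hinv
      (fun i hi => List.mem_range.mp hi)]
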